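-- pv_equiv track=rewrite | github.com/telmaau/ks-tutkielma | code/analyses/helpers.py | to_tokens
-- ===== SOURCE A (Python) =====
-- def to_tokens(s, stopwords=None, min_chars=1):
--     """
--     Transforms sentence to list of tokens.
--
--     Basic: transform special characters to ascii + lowercase.
--     Options:
--     - remove stopwords (provide list of stopwords)
--     - set minimum length for tokens: will remove any shorter token.
--
--     Returns sorted tokens
--     """
--     #s = unidecode(str(s)) # convert to ASCII to remove special characters
--     s = s.lower() # lowercase
--     tokens = s.split(";") # split the string into a list of words
--
--     if min_chars > 1:
--         tokens = [word for word in tokens if len(word) >= min_chars] # remove any shorter words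
--
--     if stopwords is not None:
--           tokens = [word for word in tokens if word not in stopwords] # remove words if they appear in our stopwords list
--
--     tokens = set(tokens) # transforming a list to a set removes duplicates
--     tokens = sorted(tokens) # converts our set back to a list and sorts words in alphabetical order
--     return tokens
-- ===== SOURCE B (Python) =====
-- def to_tokens(s, stopwords=None, min_chars=1):
--     # One pass of guarded filtering, then sort and remove adjacent duplicates
--     # while walking the sorted list once (no hash set).
--     kept = []
--     for word in s.lower().split(";"):
--         if min_chars > 1 and len(word) < min_chars:
--             continue
--         if stopwords is not None and word in stopwords:
--             continue
--         kept.append(word)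
--     kept.sort()
--     out = []
--     prev = None
--     for word in kept:
--         if prev != word:
--             out.append(word)
--             prev = word
--     return out
-- ===== Notes on version B (the rewrite author's own statement) =====
-- stated objective: alternative
-- what changed: Replaces set(tokens)+sorted with a single filtering pass followed by sort-then-scan adjacent-duplicate removal (no hash set), so dedup is order-based instead of hash-based.
import Mathlib
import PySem

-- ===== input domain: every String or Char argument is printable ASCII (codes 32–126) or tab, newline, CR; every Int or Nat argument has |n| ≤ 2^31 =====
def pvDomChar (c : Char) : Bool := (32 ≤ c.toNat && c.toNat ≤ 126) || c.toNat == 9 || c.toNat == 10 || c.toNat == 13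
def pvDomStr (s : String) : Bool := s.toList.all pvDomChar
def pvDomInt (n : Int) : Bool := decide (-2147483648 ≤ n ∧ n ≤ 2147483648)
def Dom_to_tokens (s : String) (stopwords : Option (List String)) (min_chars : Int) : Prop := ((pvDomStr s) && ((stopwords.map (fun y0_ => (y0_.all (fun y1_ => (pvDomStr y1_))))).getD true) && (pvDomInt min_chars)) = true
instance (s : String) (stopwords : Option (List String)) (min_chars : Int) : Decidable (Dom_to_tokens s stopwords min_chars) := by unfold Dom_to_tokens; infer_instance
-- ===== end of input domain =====

-- B replaces set()+sorted by a one-pass guarded filter, then sort and a single scan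
-- removing adjacent duplicates (no hash set): an alternative, order-based dedup.


-- ===== PORT A =====
def to_tokens (s : String) (stopwords : Option (List String)) (min_chars : Int) : List String :=
  let s := PySem.Str.lower s
  let tokens := (PySem.Str.split? s ";").getD []
  let tokens := if min_chars > 1 then tokens.filter (fun w => decide (min_chars ≤ PySem.Str.len w)) else tokens
  let tokens := match stopwords with
    | none => tokens
    | some sw => tokens.filter (fun w => !(sw.contains w))
  PySem.List.sorted (PySem.Set.ofList tokens) (fun x => x) false

-- ===== PORT B =====
def to_tokens_alt (s : String) (stopwords : Option (List String)) (min_chars : Int) : List String :=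
  let kept := ((PySem.Str.split? (PySem.Str.lower s) ";").getD []).foldl
    (fun kept w =>
      if min_chars > 1 && decide (PySem.Str.len w < min_chars) then kept
      else if (match stopwords with | none => false | some sw => sw.contains w) then kept
      else kept ++ [w]) []
  let kept := PySem.List.sorted kept (fun x => x) false
  (kept.foldl (fun (st : List String × Option String) w =>
      if st.2 ≠ some w then (st.1 ++ [w], some w) else st) (([] : List String), (none : Option String))).1

-- ===== PRECONDITION & SPEC =====
def Spec_to_tokens (s : String) (stopwords : Option (List String)) (min_chars : Int) (out : List String) : Prop := out = to_tokens_alt s stopwords min_chars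
instance (s : String) (stopwords : Option (List String)) (min_chars : Int) (out : List String) : Decidable (Spec_to_tokens s stopwords min_chars out) := by unfold Spec_to_tokens; infer_instance

-- ===== CLAIM (what is proved, stated in full; the proofs are below) =====
def Claim_equal_to_tokens : Prop := ∀ (s : String) (stopwords : Option (List String)) (min_chars : Int), Dom_to_tokens s stopwords min_chars → Spec_to_tokens s stopwords min_chars (to_tokens s stopwords min_chars)

-- ===== LEMMAS AND PROOFS =====

-- the filtering fold of B equals two successive filters
theorem foldl_two_guards (p q : String → Bool) (l acc : List String) :
    l.foldl (fun kept w => if p w then kept else if q w then kept else kept ++ [w]) acc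
      = acc ++ (l.filter (fun w => !p w)).filter (fun w => !q w) := by
  induction l generalizing acc with
  | nil => simp
  | cons w t ih =>
    by_cases hp : p w
    · simp [List.foldl_cons, hp, ih]
    · by_cases hq : q w <;> simp [List.foldl_cons, hp, hq, ih]

-- structural form of B's dedup scan
def uniqFrom : List String → Option String → List String
  | [], _ => []
  | w :: rest, prev => if prev = some w then uniqFrom rest prev else w :: uniqFrom rest (some w)

theorem foldl_dedup_eq_uniqFrom (l : List String) (out : List String) (prev : Option String) :
    (l.foldl (fun (st : List String × Option String) w =>
        if st.2 ≠ some w then (st.1 ++ [w], some w) else st) (out, prev)).1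
      = out ++ uniqFrom l prev := by
  induction l generalizing out prev with
  | nil => simp [uniqFrom]
  | cons w t ih =>
    rw [List.foldl_cons]
    by_cases h : prev = some w
    · rw [if_neg (by simp [h]), uniqFrom, if_pos h]
      exact ih out prev
    · rw [if_pos (by simp [h]), uniqFrom, if_neg h, ih, List.append_assoc]
      rfl

theorem mem_uniqFrom (l : List String) (prev : Option String)
    (hs : l.Pairwise (· ≤ ·)) (hp : ∀ y ∈ l, ∀ p, prev = some p → p ≤ y) :
    ∀ x, x ∈ uniqFrom l prev ↔ (x ∈ l ∧ prev ≠ some x) := by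
  induction l generalizing prev with
  | nil => simp [uniqFrom]
  | cons w t ih =>
    have hst := (List.pairwise_cons.mp hs).2
    have hw := (List.pairwise_cons.mp hs).1
    intro x
    by_cases h : prev = some w
    · rw [uniqFrom, if_pos h]
      rw [ih prev hst (fun y hy p hpe => hp y (List.mem_cons_of_mem _ hy) p hpe) x]
      subst h
      constructor
      · rintro ⟨hx, hne⟩
        exact ⟨List.mem_cons_of_mem _ hx, hne⟩
      · rintro ⟨hx, hne⟩
        rcases List.mem_cons.mp hx with rfl | hx
        · exact absurd rfl hne
        · exact ⟨hx, hne⟩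
    · rw [uniqFrom, if_neg h]
      rw [List.mem_cons, ih (some w) hst (fun y hy p hpe => (Option.some.inj hpe) ▸ hw y hy) x]
      constructor
      · rintro (rfl | ⟨hx, hne⟩)
        · exact ⟨List.mem_cons_self, h⟩
        · refine ⟨List.mem_cons_of_mem _ hx, ?_⟩
          intro he
          obtain ⟨p, rfl⟩ : ∃ p, prev = some p := ⟨x, he⟩
          have hpx : p = x := Option.some.inj he
          subst hpx
          have h1 : p ≤ w := hp w List.mem_cons_self p rfl
          have h2 : w ≤ p := hw p hx
          exact h (congrArg some (le_antisymm h1 h2))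
      · rintro ⟨hx, hne⟩
        rcases List.mem_cons.mp hx with rfl | hx
        · exact Or.inl rfl
        · rcases eq_or_ne x w with rfl | hxw
          · exact Or.inl rfl
          · exact Or.inr ⟨hx, fun he => hxw (Option.some.inj he).symm⟩

theorem pairwise_lt_uniqFrom (l : List String) (prev : Option String)
    (hs : l.Pairwise (· ≤ ·)) (hp : ∀ y ∈ l, ∀ p, prev = some p → p ≤ y) :
    (uniqFrom l prev).Pairwise (· < ·) := by
  induction l generalizing prev with
  | nil => simp [uniqFrom]
  | cons w t ih =>
    have hst := (List.pairwise_cons.mp hs).2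
    have hw := (List.pairwise_cons.mp hs).1
    by_cases h : prev = some w
    · rw [uniqFrom, if_pos h]
      exact ih prev hst (fun y hy p hpe => hp y (List.mem_cons_of_mem _ hy) p hpe)
    · rw [uniqFrom, if_neg h]
      refine List.pairwise_cons.mpr ⟨?_, ih (some w) hst (fun y hy p hpe => (Option.some.inj hpe) ▸ hw y hy)⟩
      intro y hy
      have := (mem_uniqFrom t (some w) hst (fun y hy p hpe => (Option.some.inj hpe) ▸ hw y hy) y).mp hy
      exact lt_of_le_of_ne (hw y this.1) (fun he => this.2 (by rw [he]))

theorem keptA_eq (sw? : Option (List String)) (mc : Int) (T0 : List String) :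
    T0.foldl (fun kept w =>
      if mc > 1 && decide (PySem.Str.len w < mc) then kept
      else if (match sw? with | none => false | some sw => sw.contains w) then kept
      else kept ++ [w]) []
    = (match sw? with
       | none => (if mc > 1 then T0.filter (fun w => decide (mc ≤ PySem.Str.len w)) else T0)
       | some sw => (if mc > 1 then T0.filter (fun w => decide (mc ≤ PySem.Str.len w)) else T0).filter (fun w => !(sw.contains w))) := by
  rw [foldl_two_guards, List.nil_append]
  have hfirst : T0.filter (fun w => !(mc > 1 && decide (PySem.Str.len w < mc)))
      = (if mc > 1 then T0.filter (fun w => decide (mc ≤ PySem.Str.len w)) else T0) := by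
    by_cases hmc : mc > 1
    · rw [if_pos hmc]
      apply List.filter_congr
      intro w _
      simp [hmc, ← decide_not, not_lt]
    · rw [if_neg hmc]
      apply List.filter_eq_self.mpr
      intro w _
      simp [hmc]
  cases sw? with
  | none => rw [← hfirst]; apply List.filter_eq_self.mpr; intro w _; rfl
  | some sw => rw [hfirst]

theorem sorted_set_eq_uniq_sorted (T : List String) :
    PySem.List.sorted (PySem.Set.ofList T) (fun x => x) false
      = uniqFrom (PySem.List.sorted T (fun x => x) false) none := by
  have hsortpw : (PySem.List.sorted T (fun x => x) false).Pairwise (· ≤ ·) :=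
    PySem.List.sorted_pairwise T (fun x => x)
  have hprev : ∀ y ∈ PySem.List.sorted T (fun x => x) false,
      ∀ p, (none : Option String) = some p → p ≤ y := by
    intro y _ p h; cases h
  have hpwlt := pairwise_lt_uniqFrom _ none hsortpw hprev
  have hmem := mem_uniqFrom _ none hsortpw hprev
  have hnd : (uniqFrom (PySem.List.sorted T (fun x => x) false) none).Nodup :=
    hpwlt.imp (fun h => ne_of_lt h)
  have hperm : (uniqFrom (PySem.List.sorted T (fun x => x) false) none).Perm (PySem.Set.ofList T) := by
    rw [List.perm_ext_iff_of_nodup hnd (PySem.Set.nodup_ofList T)]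
    intro a
    rw [hmem a, PySem.Set.mem_ofList, PySem.List.mem_sorted]
    simp
  exact PySem.List.sorted_eq_of_perm_of_pairwise_lt _ _ _ hperm hpwlt

-- ===== VERDICT (by name: the statement is the Claim_ definition above) =====
theorem to_tokens_spec : Claim_equal_to_tokens := by
  intro s stopwords min_chars _
  unfold Spec_to_tokens to_tokens to_tokens_alt
  rw [keptA_eq, foldl_dedup_eq_uniqFrom, List.nil_append, sorted_set_eq_uniq_sorted]
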